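-- pv_equiv track=rewrite | github.com/Jesy05/CalculadoraDeAlgebra | Calculadora1.py | parse_function
-- ===== SOURCE A (Python) =====
-- import math
--
-- def parse_function(func):
--     """Prepara la función ingresada para ser evaluada."""
--     func = func.replace("^", "**")  # Reemplaza el operador de potencia
--     func = func.replace(" ", "")   # Elimina espacios
--     func = func.replace("sen", "math.sin") \
--                .replace("cos", "math.cos") \
--                .replace("tan", "math.tan") \
--                .replace("log", "math.log") \
--                .replace("exp", "math.exp") \
--                .replace("e", str(math.exp(1)))  # Sustituye e por su valor numérico
--     func = ''.join([f'*{char}' if i > 0 and char.isalpha() and func[i-1].isdigit() else char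
--                     for i, char in enumerate(func)])
--     return func
-- ===== SOURCE B (Python) =====
-- import math
-- import re
--
-- _REPLACEMENTS = [
--     ("^", "**"),
--     (" ", ""),
--     ("sen", "math.sin"),
--     ("cos", "math.cos"),
--     ("tan", "math.tan"),
--     ("log", "math.log"),
--     ("exp", "math.exp"),
--     ("e", str(math.exp(1))),
-- ]
--
-- def parse_function(func):
--     """Prepara la función ingresada para ser evaluada."""
--     for old, new in _REPLACEMENTS:
--         func = func.replace(old, new)
--     return re.sub(r'(?<=[0-9])(?=[A-Za-z])', '*', func)
-- ===== Notes on version B (the rewrite author's own statement) =====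
-- stated objective: idiomatic
-- what changed: The replace chain is driven from a table by one loop, and the final index-referencing enumerate comprehension is replaced by a single regex substitution (an adjacent-pair boundary scan in the port) inserting a multiplication sign at every digit-letter boundary.
import Mathlib
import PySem

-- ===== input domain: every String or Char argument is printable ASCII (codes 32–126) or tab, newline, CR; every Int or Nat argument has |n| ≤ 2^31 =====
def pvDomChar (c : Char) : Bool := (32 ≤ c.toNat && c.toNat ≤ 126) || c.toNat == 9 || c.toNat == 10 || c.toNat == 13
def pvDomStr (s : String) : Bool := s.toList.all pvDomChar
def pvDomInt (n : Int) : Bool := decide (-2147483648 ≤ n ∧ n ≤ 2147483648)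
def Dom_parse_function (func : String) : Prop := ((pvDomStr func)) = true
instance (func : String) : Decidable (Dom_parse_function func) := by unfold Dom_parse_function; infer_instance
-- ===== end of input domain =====

-- B replaces A's index-based insertion comprehension with a boundary-driven pass (re.sub in Python,
-- an adjacent-pair scan in the port) and drives the replace chain from a table; same return value (idiomatic; a timing run measured B faster by a constant factor).


-- ===== PORT A =====
-- literal transliteration of A: the chain of .replace calls ("e" → str(math.exp(1)) = "2.718281828459045"),
-- then ''.join of the enumerate comprehension that consults func[i-1] by index.
def parse_function (func : String) : String :=
  let f1 := PySem.Str.replace func "^" "**"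
  let f2 := PySem.Str.replace f1 " " ""
  let f3 := PySem.Str.replace f2 "sen" "math.sin"
  let f4 := PySem.Str.replace f3 "cos" "math.cos"
  let f5 := PySem.Str.replace f4 "tan" "math.tan"
  let f6 := PySem.Str.replace f5 "log" "math.log"
  let f7 := PySem.Str.replace f6 "exp" "math.exp"
  let f8 := PySem.Str.replace f7 "e" "2.718281828459045"
  let cs := f8.toList
  String.ofList ((PySem.List.enumerate cs).flatMap (fun ic =>
    if ic.1 > 0 && PySem.Chars.isalpha ic.2
        && PySem.Chars.isdigit (PySem.List.pyGetD cs (ic.1 - 1) ' ')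
    then ['*', ic.2] else [ic.2]))

-- ===== PORT B =====
-- B's table of replacements, folded over the input in order.
def pfTable : List (String × String) :=
  [("^", "**"), (" ", ""), ("sen", "math.sin"), ("cos", "math.cos"),
   ("tan", "math.tan"), ("log", "math.log"), ("exp", "math.exp"),
   ("e", "2.718281828459045")]

-- port of re.sub(r'(?<=[0-9])(?=[A-Za-z])', '*', ·): insert '*' at every digit/letter boundary
-- (the regex classes [0-9] and [A-Za-z] are exactly PySem.Chars.isdigit / isalpha).
def pfInsertStars : List Char → List Char
  | [] => []
  | [c] => [c]
  | a :: b :: rest =>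
      if PySem.Chars.isdigit a && PySem.Chars.isalpha b
      then a :: '*' :: pfInsertStars (b :: rest)
      else a :: pfInsertStars (b :: rest)

def parse_function_alt (func : String) : String :=
  let g := pfTable.foldl (fun s p => PySem.Str.replace s p.1 p.2) func
  String.ofList (pfInsertStars g.toList)

-- ===== PRECONDITION & SPEC =====
def Spec_parse_function (func : String) (out : String) : Prop := out = parse_function_alt func
instance (func : String) (out : String) : Decidable (Spec_parse_function func out) := by unfold Spec_parse_function; infer_instance

-- ===== CLAIM (what is proved, stated in full; the proofs are below) =====
def Claim_equal_parse_function : Prop := ∀ (func : String), Dom_parse_function func → Spec_parse_function func (parse_function func)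

-- ===== LEMMAS AND PROOFS =====

-- proof-only helper: scan carrying the previous character
def pfPairScan (p : Char) : List Char → List Char
  | [] => []
  | c :: rest =>
      (if PySem.Chars.isdigit p && PySem.Chars.isalpha c then ['*', c] else [c])
        ++ pfPairScan c rest

-- the enumerate comprehension, with its index lookups into the full list, equals the pair scan
theorem pfEnum_eq_pairScan (full : List Char) : ∀ (cs : List Char) (k : Nat),
    full.drop k = cs →
    (PySem.List.enumerate cs (k : Int)).flatMap (fun ic =>
      if ic.1 > 0 && PySem.Chars.isalpha ic.2
          && PySem.Chars.isdigit (PySem.List.pyGetD full (ic.1 - 1) ' ')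
      then ['*', ic.2] else [ic.2])
      = pfPairScan (if k = 0 then ' ' else full.getD (k - 1) ' ') cs := by
  intro cs
  induction cs with
  | nil => intro k _; simp [PySem.List.enumerate_nil, pfPairScan]
  | cons c rest ih =>
    intro k hk
    have hgetk : full.getD k ' ' = c := by
      have : full[k]? = some c := by
        have := congrArg (·.head?) hk
        simpa [List.head?_drop] using this
      simp [List.getD, this]
    have hdrop : full.drop (k + 1) = rest := by
      have := congrArg List.tail hk
      rwa [List.tail_drop] at this
    rw [PySem.List.enumerate_cons, List.flatMap_cons]
    have hrec := ih (k + 1) hdrop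
    have hkcast : ((k : Int) + 1) = ((k + 1 : Nat) : Int) := by push_cast; ring
    rw [hkcast, hrec]
    simp only [Nat.add_sub_cancel, Nat.add_eq_zero, one_ne_zero, and_false, if_false, hgetk]
    rcases Nat.eq_zero_or_pos k with h0 | hpos
    · subst h0
      simp [pfPairScan, PySem.Chars.isdigit]
    · have hk1 : ((k : Int) - 1) = ((k - 1 : Nat) : Int) := by omega
      have hgt : (0 : Int) < (k : Int) := by exact_mod_cast hpos
      simp only [hk1, PySem.List.pyGetD_natCast, if_neg (Nat.pos_iff_ne_zero.mp hpos),
        pfPairScan]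
      have : (decide ((0:Int) < (k : Int)) && PySem.Chars.isalpha c
          && PySem.Chars.isdigit (full.getD (k - 1) ' '))
          = (PySem.Chars.isdigit (full.getD (k - 1) ' ') && PySem.Chars.isalpha c) := by
        rw [decide_eq_true hgt]
        cases PySem.Chars.isalpha c <;> cases PySem.Chars.isdigit (full.getD (k - 1) ' ') <;> rfl
      rw [this]

-- cons form of the pair scan vs the adjacent-pair recursion
theorem pfPairScan_cons (a : Char) (cs : List Char) :
    a :: pfPairScan a cs = pfInsertStars (a :: cs) := by
  induction cs generalizing a with
  | nil => rfl
  | cons b rest ih =>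
    rw [pfPairScan, pfInsertStars]
    split <;> rename_i h <;> rw [← ih b] <;> simp_all

-- the enumerate comprehension that star-prefixes a letter whose predecessor is a digit
-- equals the adjacent-pair scan.
theorem pfInsert_eq (cs : List Char) :
    (PySem.List.enumerate cs).flatMap (fun ic =>
      if ic.1 > 0 && PySem.Chars.isalpha ic.2
          && PySem.Chars.isdigit (PySem.List.pyGetD cs (ic.1 - 1) ' ')
      then ['*', ic.2] else [ic.2]) = pfInsertStars cs := by
  have h := pfEnum_eq_pairScan cs cs 0 (by simp)
  simp only [Nat.cast_zero] at h
  rw [if_pos trivial] at h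
  cases cs with
  | nil => rfl
  | cons a rest =>
    rw [h, pfPairScan, ← pfPairScan_cons]
    simp [PySem.Chars.isdigit]

-- ===== VERDICT (by name: the statement is the Claim_ definition above) =====
theorem parse_function_spec : Claim_equal_parse_function := by
  intro func _
  unfold Spec_parse_function parse_function parse_function_alt pfTable
  simp only [List.foldl]
  rw [pfInsert_eq]
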